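-- pv_equiv track=rewrite | github.com/pypi-data/pypi-mirror-357 | packages/atgtools/atgtools-0.1.9rc0-py3-none-any.whl/atg/lefse/format.py | rename_same_subcl
-- ===== SOURCE A (Python) =====
-- def rename_same_subcl(cla, subcl):
--     toc = []
--     for sc in set(subcl):
--         subclis = []
--         # pylint: disable=unused-variable
--         for i, k in enumerate(subcl):
--             if sc == subcl[i]:
--                 subclis.append(cla[i])
--         if len(set(subclis)) > 1:
--             toc.append(sc)
--     new_subcl = []
--     for i, sc in enumerate(subcl):
--         if sc in toc:
--             new_subcl.append(cla[i] + "_" + sc)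
--         else:
--             new_subcl.append(sc)
--     return new_subcl
-- ===== SOURCE B (Python) =====
-- def rename_same_subcl(cla, subcl):
--     groups = {}
--     for c, sc in zip(cla, subcl):
--         groups.setdefault(sc, set()).add(c)
--     multi = {sc for sc, cs in groups.items() if len(cs) > 1}
--     return [c + "_" + sc if sc in multi else sc for c, sc in zip(cla, subcl)]
-- ===== Notes on version B (the rewrite author's own statement) =====
-- stated objective: faster
-- what changed: One pass over zip(cla, subcl) builds a dict mapping each subclass to the set of its classes, replacing A's rescan of the whole subcl/cla lists for every distinct subclass; the renaming pass then checks the set of multi-class keys.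
import Mathlib
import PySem

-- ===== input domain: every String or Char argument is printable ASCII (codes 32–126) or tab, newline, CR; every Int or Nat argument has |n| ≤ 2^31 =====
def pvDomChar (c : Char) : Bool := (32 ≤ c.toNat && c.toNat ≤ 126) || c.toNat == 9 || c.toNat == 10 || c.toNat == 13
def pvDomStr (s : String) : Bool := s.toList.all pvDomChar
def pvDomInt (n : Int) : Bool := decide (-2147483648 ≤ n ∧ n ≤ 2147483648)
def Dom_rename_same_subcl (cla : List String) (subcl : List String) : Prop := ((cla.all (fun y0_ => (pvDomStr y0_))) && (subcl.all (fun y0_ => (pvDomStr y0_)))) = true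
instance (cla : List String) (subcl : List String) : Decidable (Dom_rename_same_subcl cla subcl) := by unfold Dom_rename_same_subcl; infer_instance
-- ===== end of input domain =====

-- B replaces A's per-distinct-subclass rescan of the whole lists by one pass building a dict
-- subclass → set of classes (objective: faster, asymptotic O(U*N) → O(N)).

-- ===== PORT A =====
def rename_same_subcl (cla : List String) (subcl : List String) : List String :=
  let toc : List String :=
    List.foldl (fun toc sc =>
        let subclis : List String :=
          List.foldl (fun subclis ik =>
              if sc == PySem.List.pyGetD subcl ik.1 "" then
                subclis ++ [PySem.List.pyGetD cla ik.1 ""]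
              else subclis)
            [] (PySem.List.enumerate subcl)
        if 1 < PySem.Set.len (PySem.Set.ofList subclis) then toc ++ [sc] else toc)
      [] (PySem.Set.ofList subcl)
  List.foldl (fun out ik =>
      if toc.contains ik.2 then out ++ [PySem.List.pyGetD cla ik.1 "" ++ "_" ++ ik.2]
      else out ++ [ik.2])
    [] (PySem.List.enumerate subcl)

-- ===== PORT B =====
def rename_same_subcl_alt (cla : List String) (subcl : List String) : List String :=
  let groups : PySem.Dict String (PySem.Set String) :=
    List.foldl (fun d p => d.modify p.2 PySem.Set.empty (fun s => PySem.Set.add s p.1))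
      PySem.Dict.empty (cla.zip subcl)
  let multi : PySem.Set String :=
    PySem.Set.ofList
      (List.map Prod.fst (List.filter (fun kv => 1 < PySem.Set.len kv.2) groups.items))
  List.map (fun p => if multi.contains p.2 then p.1 ++ "_" ++ p.2 else p.2) (cla.zip subcl)

-- ===== PRECONDITION & SPEC =====
-- Pre_: A indexes cla[i] for every i < len(subcl) and raises IndexError when cla is shorter.
def Pre_rename_same_subcl (cla : List String) (subcl : List String) : Prop :=
  subcl.length ≤ cla.length
instance (cla : List String) (subcl : List String) : Decidable (Pre_rename_same_subcl cla subcl) := by unfold Pre_rename_same_subcl; infer_instance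
def pvWitness_rename_same_subcl : List String × List String := (["a", "b", "a"], ["x", "x", "y"])

def Spec_rename_same_subcl (cla : List String) (subcl : List String) (out : List String) : Prop := out = rename_same_subcl_alt cla subcl
instance (cla : List String) (subcl : List String) (out : List String) : Decidable (Spec_rename_same_subcl cla subcl out) := by unfold Spec_rename_same_subcl; infer_instance

-- ===== CLAIM (what is proved, stated in full; the proofs are below) =====
def Claim_equal_rename_same_subcl : Prop := ∀ (cla : List String) (subcl : List String), Dom_rename_same_subcl cla subcl → Pre_rename_same_subcl cla subcl → Spec_rename_same_subcl cla subcl (rename_same_subcl cla subcl)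

-- ===== LEMMAS AND PROOFS =====

-- the classes of the pairs whose subclass is sc, in order
def pvClsOf (ps : List (String × String)) (sc : String) : List String :=
  List.map Prod.fst (List.filter (fun p => p.2 == sc) ps)

theorem pv_filterMap_rel {α β γ : Type} (f : α → Option γ) (g : β → Option γ)
    {l₁ : List α} {l₂ : List β} (h : List.Forall₂ (fun a b => f a = g b) l₁ l₂) :
    l₁.filterMap f = l₂.filterMap g := by
  induction h with
  | nil => rfl
  | cons h _ ih => simp only [List.filterMap_cons, h, ih]

theorem pv_map_filter_eq_filterMap {α β : Type} (p : α → Bool) (f : α → β) (l : List α) :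
    (l.filter p).map f = l.filterMap (fun a => if p a then some (f a) else none) := by
  induction l with
  | nil => rfl
  | cons x xs ih =>
    simp only [List.filter_cons, List.filterMap_cons]
    by_cases h : p x <;> simp [h, ih]

-- value of B's groups dict at any key
theorem pv_groups_getD (ps : List (String × String)) (d : PySem.Dict String (PySem.Set String)) (sc : String) :
    (List.foldl (fun d p => d.modify p.2 PySem.Set.empty (fun s => PySem.Set.add s p.1)) d ps).getD sc PySem.Set.empty
      = PySem.Set.update (d.getD sc PySem.Set.empty) (pvClsOf ps sc) := by
  induction ps generalizing d with
  | nil => simp [pvClsOf, PySem.Set.update]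
  | cons p ps ih =>
    simp only [List.foldl_cons, ih, pvClsOf, List.filter_cons]
    by_cases h : p.2 = sc
    · simp [h, PySem.Set.update_cons]
    · have h2 : ¬ sc = p.2 := fun hh => h hh.symm
      have hb : (p.2 == sc) = false := by simp [h]
      simp [hb, h2, PySem.Dict.getD_modify]

-- A's inner scan for sc equals the zip-grouped class list, given len(subcl) ≤ len(cla)
theorem pv_subclis_eq (cla subcl : List String) (hpre : subcl.length ≤ cla.length) (sc : String) :
    List.foldl (fun subclis ik =>
        if sc == PySem.List.pyGetD subcl ik.1 "" then
          subclis ++ [PySem.List.pyGetD cla ik.1 ""]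
        else subclis)
      [] (PySem.List.enumerate subcl)
      = pvClsOf (cla.zip subcl) sc := by
  rw [PySem.List.foldl_append_if (fun ik => sc == PySem.List.pyGetD subcl ik.1 "")
    (fun ik => PySem.List.pyGetD cla ik.1 "") (PySem.List.enumerate subcl) []]
  rw [List.nil_append, pv_map_filter_eq_filterMap, pvClsOf, pv_map_filter_eq_filterMap]
  apply pv_filterMap_rel
  rw [List.forall₂_iff_get]
  constructor
  · simp [PySem.List.length_enumerate, List.length_zip, Nat.min_eq_right hpre]
  · intro i h₁ h₂
    have hi : i < subcl.length := by
      simpa [PySem.List.length_enumerate] using h₁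
    have hic : i < cla.length := Nat.lt_of_lt_of_le hi hpre
    simp only [List.get_eq_getElem, PySem.List.getElem_enumerate, List.getElem_zip]
    have h1 : PySem.List.pyGetD subcl ((0 : Int) + (i : Int)) "" = subcl[i] := by
      rw [zero_add, PySem.List.pyGetD_natCast, List.getD_eq_getElem _ _ hi]
    have h2 : PySem.List.pyGetD cla ((0 : Int) + (i : Int)) "" = cla[i] := by
      rw [zero_add, PySem.List.pyGetD_natCast, List.getD_eq_getElem _ _ hic]
    simp only [h1, h2, beq_iff_eq]
    by_cases h : subcl[i] = sc
    · simp [h]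
    · have h2' : ¬ sc = subcl[i] := fun hh => h hh.symm
      simp [h, h2']

-- membership in A's toc list
theorem pv_toc_mem (cla subcl : List String) (sc : String) :
    (List.foldl (fun toc z =>
        if 1 < PySem.Set.len (PySem.Set.ofList
            (List.foldl (fun subclis ik =>
                if z == PySem.List.pyGetD subcl ik.1 "" then
                  subclis ++ [PySem.List.pyGetD cla ik.1 ""]
                else subclis)
              [] (PySem.List.enumerate subcl)))
        then toc ++ [z] else toc)
      [] (PySem.Set.ofList subcl)).contains sc = true
      ↔ (sc ∈ subcl ∧ 1 < PySem.Set.len (PySem.Set.ofList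
           (List.foldl (fun subclis ik =>
              if sc == PySem.List.pyGetD subcl ik.1 "" then
                subclis ++ [PySem.List.pyGetD cla ik.1 ""]
              else subclis)
            [] (PySem.List.enumerate subcl)))) := by
  have hrw : (fun (toc : List String) (z : String) =>
      if 1 < PySem.Set.len (PySem.Set.ofList
          (List.foldl (fun subclis ik =>
              if z == PySem.List.pyGetD subcl ik.1 "" then
                subclis ++ [PySem.List.pyGetD cla ik.1 ""]
              else subclis)
            [] (PySem.List.enumerate subcl)))
      then toc ++ [z] else toc)
      = (fun toc z =>
        if (fun z => decide (1 < PySem.Set.len (PySem.Set.ofList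
            (List.foldl (fun subclis ik =>
                if z == PySem.List.pyGetD subcl ik.1 "" then
                  subclis ++ [PySem.List.pyGetD cla ik.1 ""]
                else subclis)
              [] (PySem.List.enumerate subcl))))) z = true
        then toc ++ [(fun (z : String) => z) z] else toc) := by
    funext toc z; simp
  rw [hrw, PySem.List.foldl_append_if, List.nil_append]
  simp only [List.contains_iff_mem, List.mem_map, List.mem_filter]
  constructor
  · rintro ⟨x, ⟨hx, hlx⟩, rfl⟩
    exact ⟨(PySem.Set.mem_ofList subcl x).mp hx, of_decide_eq_true hlx⟩
  · rintro ⟨hmem, hlen⟩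
    exact ⟨sc, ⟨(PySem.Set.mem_ofList subcl sc).mpr hmem, decide_eq_true hlen⟩, rfl⟩

-- membership in B's multi set
theorem pv_multi_mem (cla subcl : List String) (hpre : subcl.length ≤ cla.length) (sc : String) :
    (PySem.Set.ofList
      (List.map Prod.fst (List.filter (fun kv => 1 < PySem.Set.len kv.2)
        (List.foldl (fun d p => d.modify p.2 PySem.Set.empty (fun s => PySem.Set.add s p.1))
          PySem.Dict.empty (cla.zip subcl)).items))).contains sc = true
      ↔ (sc ∈ subcl ∧ 1 < PySem.Set.len (PySem.Set.ofList (pvClsOf (cla.zip subcl) sc))) := by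
  have hnd : ((cla.zip subcl).foldl (fun d p => d.modify p.2 PySem.Set.empty (fun s => PySem.Set.add s p.1)) PySem.Dict.empty).keys.Nodup :=
    PySem.Dict.nodup_keys_foldl_modify_key (cla.zip subcl) Prod.snd PySem.Set.empty
      (fun _ p s => PySem.Set.add s p.1) PySem.Dict.empty PySem.Dict.nodup_keys_empty
  have hkeys : ((cla.zip subcl).foldl (fun d p => d.modify p.2 PySem.Set.empty (fun s => PySem.Set.add s p.1)) PySem.Dict.empty).keys = PySem.Set.ofList subcl := by
    rw [PySem.Dict.keys_foldl_modify_key (cla.zip subcl) Prod.snd PySem.Set.empty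
      (fun _ p s => PySem.Set.add s p.1) PySem.Dict.empty]
    rw [PySem.Dict.keys_empty, PySem.Set.update_nil_left, List.map_snd_zip hpre]
  rw [PySem.Dict.items_eq_map_keys _ hnd PySem.Set.empty, List.filter_map, List.map_map]
  have hcomp : (Prod.fst ∘ fun k => (k, ((cla.zip subcl).foldl (fun d p => d.modify p.2 PySem.Set.empty (fun s => PySem.Set.add s p.1)) PySem.Dict.empty).getD k PySem.Set.empty)) = id := rfl
  rw [hcomp, List.map_id]
  rw [PySem.Set.ofList_eq_self_of_nodup _ (hnd.filter _)]
  rw [PySem.Set.contains_iff]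
  rw [List.mem_filter, hkeys]
  have hval : ∀ k, ((cla.zip subcl).foldl (fun d p => d.modify p.2 PySem.Set.empty (fun s => PySem.Set.add s p.1)) PySem.Dict.empty).getD k PySem.Set.empty = PySem.Set.ofList (pvClsOf (cla.zip subcl) k) := by
    intro k
    rw [pv_groups_getD, PySem.Dict.getD_empty, PySem.Set.update_empty]
  constructor
  · rintro ⟨hmem, hlen⟩
    refine ⟨(PySem.Set.mem_ofList subcl sc).mp hmem, ?_⟩
    simp only [Function.comp_apply, hval] at hlen
    exact of_decide_eq_true hlen
  · rintro ⟨hmem, hlen⟩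
    refine ⟨(PySem.Set.mem_ofList subcl sc).mpr hmem, ?_⟩
    simp only [Function.comp_apply, hval]
    exact decide_eq_true hlen

-- the renaming pass, given that the two membership tests agree on every subclass that occurs
theorem pv_final (cla subcl : List String) (hpre : subcl.length ≤ cla.length)
    (t : List String) (m : PySem.Set String)
    (h : ∀ i (_ : i < subcl.length), t.contains subcl[i] = m.contains subcl[i]) :
    List.foldl (fun out ik =>
        if t.contains ik.2 then out ++ [PySem.List.pyGetD cla ik.1 "" ++ "_" ++ ik.2]
        else out ++ [ik.2])
      [] (PySem.List.enumerate subcl)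
      = List.map (fun p => if m.contains p.2 then p.1 ++ "_" ++ p.2 else p.2) (cla.zip subcl) := by
  have hfun : (fun (out : List String) (ik : Int × String) =>
      if t.contains ik.2 then out ++ [PySem.List.pyGetD cla ik.1 "" ++ "_" ++ ik.2]
      else out ++ [ik.2])
      = fun out ik => out ++ [if t.contains ik.2 then PySem.List.pyGetD cla ik.1 "" ++ "_" ++ ik.2 else ik.2] := by
    funext out ik
    by_cases hc : ik.2 ∈ t <;> simp [hc]
  rw [hfun, PySem.List.foldl_append_singleton_eq_map, List.nil_append]
  apply List.ext_getElem
  · simp [PySem.List.length_enumerate, List.length_zip, Nat.min_eq_right hpre]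
  · intro i h1 h2
    have hi : i < subcl.length := by
      simpa [PySem.List.length_enumerate] using h1
    have hic : i < cla.length := Nat.lt_of_lt_of_le hi hpre
    simp only [List.getElem_map, PySem.List.getElem_enumerate, List.getElem_zip]
    have hg : PySem.List.pyGetD cla ((0 : Int) + (i : Int)) "" = cla[i] := by
      rw [zero_add, PySem.List.pyGetD_natCast, List.getD_eq_getElem _ _ hic]
    rw [hg, h i hi]

-- ===== VERDICT (by name: the statement is the Claim_ definition above) =====
theorem rename_same_subcl_spec : Claim_equal_rename_same_subcl := by
  intro cla subcl _ hpre
  show rename_same_subcl cla subcl = rename_same_subcl_alt cla subcl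
  have hbool : ∀ i (_ : i < subcl.length),
      (List.foldl (fun toc z =>
          if 1 < PySem.Set.len (PySem.Set.ofList
              (List.foldl (fun subclis ik =>
                  if z == PySem.List.pyGetD subcl ik.1 "" then
                    subclis ++ [PySem.List.pyGetD cla ik.1 ""]
                  else subclis)
                [] (PySem.List.enumerate subcl)))
          then toc ++ [z] else toc)
        [] (PySem.Set.ofList subcl)).contains subcl[i]
      = (PySem.Set.ofList
          (List.map Prod.fst (List.filter (fun kv => 1 < PySem.Set.len kv.2)
            (List.foldl (fun d p => d.modify p.2 PySem.Set.empty (fun s => PySem.Set.add s p.1))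
              PySem.Dict.empty (cla.zip subcl)).items))).contains subcl[i] := by
    intro i hi
    rw [Bool.eq_iff_iff, pv_toc_mem, pv_multi_mem cla subcl hpre, pv_subclis_eq cla subcl hpre]
  exact pv_final cla subcl hpre _ _ hbool
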